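-- pv_equiv track=rewrite | github.com/maxnelso/algorithms_competitions | top_coder/SRM 670/Cdgame.py | rescount
-- ===== SOURCE A (Python) =====
-- def rescount(a, b):
--   sum_a = sum(a)
--   sum_b = sum(b)
--   seen = set()
--   for i in range(len(a)):
--     for j in range(len(b)):
--       seen.add((sum_a - a[i] + b[j]) * (sum_b + a[i] - b[j]))
--   return len(seen)
-- ===== SOURCE B (Python) =====
-- def rescount(a, b):
--     k = sum(b) - sum(a)
--     diffs = {y - x for y in b for x in a}
--     reps = {min(d, k - d) if (k - d) in diffs else d for d in diffs}
--     return len(reps)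
-- ===== Notes on version B (the rewrite author's own statement) =====
-- stated objective: alternative
-- what changed: B never computes any product: it builds the set of differences d = b[j]-a[i] and counts the equivalence classes of that set under the reflection d -> k-d (k = sum(b)-sum(a)), using the algebraic fact that the product (sum_a+d)*(sum_b-d) is a quadratic in d symmetric about k/2, so two differences give the same product iff they are equal or reflections of each other; classes are counted by mapping each difference to a canonical representative min(d, k-d) when its mirror is present.
import Mathlib
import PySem

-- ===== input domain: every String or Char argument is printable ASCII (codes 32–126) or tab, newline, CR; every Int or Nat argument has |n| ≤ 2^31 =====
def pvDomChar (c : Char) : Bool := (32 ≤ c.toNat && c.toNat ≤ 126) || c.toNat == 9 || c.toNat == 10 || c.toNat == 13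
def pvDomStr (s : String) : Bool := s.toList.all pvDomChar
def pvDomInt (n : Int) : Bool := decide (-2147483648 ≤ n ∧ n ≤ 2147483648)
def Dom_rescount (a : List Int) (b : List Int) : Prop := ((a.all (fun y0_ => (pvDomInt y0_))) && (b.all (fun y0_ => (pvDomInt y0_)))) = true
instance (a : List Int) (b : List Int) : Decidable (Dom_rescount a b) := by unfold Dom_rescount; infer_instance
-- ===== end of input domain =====

-- B computes no product at all: it counts equivalence classes of the difference set
-- under the reflection d ↦ k−d (k = sum b − sum a), exploiting the symmetry of the
-- quadratic (sum_a+d)(sum_b−d); an alternative algorithm of the same cost.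

-- ===== PORT A =====
def rescount (a : List Int) (b : List Int) : Int :=
  let sum_a := a.sum
  let sum_b := b.sum
  let seen : PySem.Set Int :=
    (PySem.List.pyRange 0 (a.length : Int) 1).foldl (fun s i =>
      (PySem.List.pyRange 0 (b.length : Int) 1).foldl (fun s j =>
        PySem.Set.add s ((sum_a - PySem.List.pyGetD a i 0 + PySem.List.pyGetD b j 0) *
                         (sum_b + PySem.List.pyGetD a i 0 - PySem.List.pyGetD b j 0))) s)
      PySem.Set.empty
  PySem.Set.len seen

-- ===== PORT B =====
def rescount_alt (a : List Int) (b : List Int) : Int :=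
  let k := b.sum - a.sum
  let diffs : PySem.Set Int := PySem.Set.ofList (b.flatMap (fun y => a.map (fun x => y - x)))
  let reps : PySem.Set Int := PySem.Set.ofList (diffs.map (fun d =>
    if PySem.Set.contains diffs (k - d) then min d (k - d) else d))
  PySem.Set.len reps

-- ===== PRECONDITION & SPEC =====
def Spec_rescount (a : List Int) (b : List Int) (out : Int) : Prop := out = rescount_alt a b
instance (a : List Int) (b : List Int) (out : Int) : Decidable (Spec_rescount a b out) := by unfold Spec_rescount; infer_instance

-- ===== CLAIM (what is proved, stated in full; the proofs are below) =====
def Claim_equal_rescount : Prop := ∀ (a : List Int) (b : List Int), Dom_rescount a b → Spec_rescount a b (rescount a b)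

-- ===== LEMMAS AND PROOFS =====

-- A's nested index loop equals the nested fold over the list elements themselves.
theorem rescount_eq_foldl (a b : List Int) :
    rescount a b = PySem.Set.len
      (a.foldl (fun s x => b.foldl (fun s y =>
        PySem.Set.add s ((a.sum - x + y) * (b.sum + x - y))) s) PySem.Set.empty) := by
  unfold rescount
  have hinner : ∀ (x : Int) (s : PySem.Set Int),
      (PySem.List.pyRange 0 (b.length : Int) 1).foldl (fun s j =>
        PySem.Set.add s ((a.sum - x + PySem.List.pyGetD b j 0) *
                         (b.sum + x - PySem.List.pyGetD b j 0))) s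
      = b.foldl (fun s y => PySem.Set.add s ((a.sum - x + y) * (b.sum + x - y))) s := by
    intro x s
    exact PySem.List.foldl_pyRange_zero_pyGetD' b 0
      (fun s y => PySem.Set.add s ((a.sum - x + y) * (b.sum + x - y))) s
  have houter := PySem.List.foldl_pyRange_zero_pyGetD' a 0
    (fun s x => b.foldl (fun s y => PySem.Set.add s ((a.sum - x + y) * (b.sum + x - y))) s)
    (PySem.Set.empty (α := Int))
  refine congrArg PySem.Set.len ?_
  calc (PySem.List.pyRange 0 (a.length : Int) 1).foldl (fun s i =>
        (PySem.List.pyRange 0 (b.length : Int) 1).foldl (fun s j =>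
          PySem.Set.add s ((a.sum - PySem.List.pyGetD a i 0 + PySem.List.pyGetD b j 0) *
                           (b.sum + PySem.List.pyGetD a i 0 - PySem.List.pyGetD b j 0))) s)
        PySem.Set.empty
      = (PySem.List.pyRange 0 (a.length : Int) 1).foldl (fun s i =>
          b.foldl (fun s y =>
            PySem.Set.add s ((a.sum - PySem.List.pyGetD a i 0 + y) *
                             (b.sum + PySem.List.pyGetD a i 0 - y))) s) PySem.Set.empty := by
        exact PySem.List.foldl_congr_mem _ _ _ _
          (fun s i _ => hinner (PySem.List.pyGetD a i 0) s)
    _ = a.foldl (fun s x => b.foldl (fun s y =>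
          PySem.Set.add s ((a.sum - x + y) * (b.sum + x - y))) s) PySem.Set.empty := houter

-- the nested add-fold is set(<flatMap of all pair values>)
theorem foldl_eq_ofList_flatMap (a b : List Int) (g : Int → Int → Int) :
    a.foldl (fun s x => b.foldl (fun s y => PySem.Set.add s (g x y)) s) PySem.Set.empty
      = PySem.Set.ofList (a.flatMap (fun x => b.map (fun y => g x y))) := by
  rw [PySem.Set.ofList_eq_foldl, List.flatMap, List.foldl_flatten, List.foldl_map]
  refine PySem.List.foldl_congr_mem _ _ _ _ (fun s x _ => ?_)
  rw [List.foldl_map]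

-- sets of two lists with the same members have the same size
theorem len_ofList_congr {L1 L2 : List Int} (h : ∀ z, z ∈ L1 ↔ z ∈ L2) :
    PySem.Set.len (PySem.Set.ofList L1) = PySem.Set.len (PySem.Set.ofList L2) := by
  unfold PySem.Set.len
  refine congrArg _ (List.Perm.length_eq ?_)
  rw [List.perm_ext_iff_of_nodup (PySem.Set.nodup_ofList _) (PySem.Set.nodup_ofList _)]
  intro z
  simp [PySem.Set.mem_ofList, h]

-- mapping by a function injective on the list's members preserves the set size
theorem len_ofList_map_injOn (M : List Int) (f : Int → Int)
    (hinj : ∀ u ∈ M, ∀ v ∈ M, f u = f v → u = v) :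
    PySem.Set.len (PySem.Set.ofList (M.map f)) = PySem.Set.len (PySem.Set.ofList M) := by
  have hsub : ∀ u ∈ PySem.Set.ofList M, u ∈ M := by
    intro u hu; exact (PySem.Set.mem_ofList M u).mp hu
  have hnodup : ((PySem.Set.ofList M).map f).Nodup :=
    (PySem.Set.nodup_ofList M).map_on
      (fun u hu v hv h => hinj u (hsub u hu) v (hsub v hv) h)
  have hperm : (PySem.Set.ofList (M.map f)).Perm ((PySem.Set.ofList M).map f) := by
    rw [List.perm_ext_iff_of_nodup (PySem.Set.nodup_ofList _) hnodup]
    intro z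
    simp [PySem.Set.mem_ofList]
  unfold PySem.Set.len
  rw [hperm.length_eq, List.length_map]

-- ===== VERDICT (by name: the statement is the Claim_ definition above) =====
theorem rescount_spec : Claim_equal_rescount := by
  intro a b _
  unfold Spec_rescount rescount_alt
  set k := b.sum - a.sum with hk
  set D : PySem.Set Int := PySem.Set.ofList (b.flatMap (fun y => a.map (fun x => y - x))) with hD
  set r : Int → Int := fun d => if PySem.Set.contains D (k - d) then min d (k - d) else d with hr
  set f : Int → Int := fun d => (a.sum + d) * (b.sum - d) with hf
  -- A's result is the size of the set of f over all differences
  have hA : rescount a b = PySem.Set.len (PySem.Set.ofList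
      ((a.flatMap (fun x => b.map (fun y => y - x))).map f)) := by
    rw [rescount_eq_foldl, foldl_eq_ofList_flatMap]
    refine congrArg (fun L => PySem.Set.len (PySem.Set.ofList L)) ?_
    rw [List.map_flatMap]
    refine congrArg (fun g => a.flatMap g) (funext fun x => ?_)
    rw [List.map_map]
    refine congrArg (fun g => b.map g) (funext fun y => ?_)
    simp only [Function.comp, hf]
    ring
  rw [hA]
  -- same members: all-pairs differences vs the deduplicated difference set D
  have hmemD : ∀ z : Int, z ∈ (a.flatMap (fun x => b.map (fun y => y - x))) ↔ z ∈ D := by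
    intro z
    simp only [hD, PySem.Set.mem_ofList, List.mem_flatMap, List.mem_map]
    constructor
    · rintro ⟨x, hx, y, hy, rfl⟩; exact ⟨y, hy, x, hx, rfl⟩
    · rintro ⟨y, hy, x, hx, rfl⟩; exact ⟨x, hx, y, hy, rfl⟩
  have h1 : PySem.Set.len (PySem.Set.ofList
      ((a.flatMap (fun x => b.map (fun y => y - x))).map f))
      = PySem.Set.len (PySem.Set.ofList (D.map f)) := by
    refine len_ofList_congr (fun z => ?_)
    simp only [List.mem_map]
    exact ⟨fun ⟨d, hd, h⟩ => ⟨d, (hmemD d).mp hd, h⟩,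
           fun ⟨d, hd, h⟩ => ⟨d, (hmemD d).mpr hd, h⟩⟩
  -- f ∘ r = f : the product is symmetric under d ↦ k − d
  have hfr : ∀ d : Int, f (r d) = f d := by
    intro d
    simp only [hr]
    by_cases hc : PySem.Set.contains D (k - d)
    · simp only [if_pos hc]
      rcases min_choice d (k - d) with h | h <;> rw [h]
      simp only [hf, hk]; ring
    · simp only [if_neg hc]
  have h2 : D.map f = (D.map r).map f := by
    rw [List.map_map]
    exact (congrArg (fun g => D.map g) (funext fun d => (hfr d).symm))
  -- r maps D into D, and every r-value is ≤ its mirror when the mirror is in D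
  have hrD : ∀ d ∈ D, r d ∈ D := by
    intro d hd
    simp only [hr]
    by_cases hc : PySem.Set.contains D (k - d)
    · simp only [if_pos hc]
      rcases min_choice d (k - d) with h | h <;> rw [h]
      · exact hd
      · exact (PySem.Set.contains_iff D (k - d)).mp hc
    · simp only [if_neg hc]; exact hd
  have hrmin : ∀ d ∈ D, (k - r d) ∈ D → r d ≤ k - r d := by
    intro d _ hmir
    simp only [hr] at hmir ⊢
    by_cases hc : PySem.Set.contains D (k - d)
    · simp only [if_pos hc]
      rcases le_total d (k - d) with h | h
      · rw [min_eq_left h]; exact h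
      · rw [min_eq_right h]; omega
    · simp only [if_neg hc] at hmir ⊢
      exact absurd ((PySem.Set.contains_iff D (k - d)).mpr hmir) hc
  -- f is injective on the canonical representatives
  have hinj : ∀ u ∈ D.map r, ∀ v ∈ D.map r, f u = f v → u = v := by
    intro u hu v hv hfe
    rcases List.mem_map.mp hu with ⟨du, hdu, rfl⟩
    rcases List.mem_map.mp hv with ⟨dv, hdv, rfl⟩
    -- f u = f v forces u = v or u + v = k
    have hzero : (r du - r dv) * (r du + r dv - k) = 0 := by
      simp only [hf, hk] at hfe ⊢; nlinarith [hfe]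
    rcases mul_eq_zero.mp hzero with h | h
    · omega
    · -- mirror case: r dv = k - r du, both canonical ⇒ equal
      have huD : r du ∈ D := hrD du hdu
      have hvD : r dv ∈ D := hrD dv hdv
      have h1' : r du ≤ k - r du := hrmin du hdu (by
        have : k - r du = r dv := by omega
        rw [this]; exact hvD)
      have h2' : r dv ≤ k - r dv := hrmin dv hdv (by
        have : k - r dv = r du := by omega
        rw [this]; exact huD)
      omega
  rw [h1, h2, len_ofList_map_injOn (D.map r) f hinj]
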